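-- pv_equiv track=rewrite | github.com/AariyaTharshan/NeroDS-AD | Doc_module/backend/app.py | clinical_grouping
-- ===== SOURCE A (Python) =====
-- def clinical_grouping(num_classes):
--     if num_classes == 5:
--         return {"CN": [0, 1], "MCI": [2], "AD": [3, 4]}
--     if num_classes == 3:
--         return {"CN": [0], "MCI": [1], "AD": [2]}
--
--     groups = {"CN": [], "MCI": [], "AD": []}
--     for index in range(num_classes):
--         if index <= max(0, num_classes // 3 - 1):
--             groups["CN"].append(index)
--         elif index >= max(0, (2 * num_classes) // 3):
--             groups["AD"].append(index)
--         else: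
--             groups["MCI"].append(index)
--     return groups
-- ===== SOURCE B (Python) =====
-- def clinical_grouping(num_classes):
--     if num_classes == 5:
--         return {"CN": [0, 1], "MCI": [2], "AD": [3, 4]}
--     cn_end = max(0, num_classes // 3 - 1)
--     ad_start = max(0, (2 * num_classes) // 3)
--     cut1 = min(cn_end + 1, num_classes)
--     cut2 = min(max(cut1, ad_start), num_classes)
--     return {"CN": list(range(cut1)),
--             "MCI": list(range(cut1, cut2)),
--             "AD": list(range(cut2, num_classes))}
-- ===== Notes on version B (the rewrite author's own statement) =====
-- stated objective: faster
-- what changed: Replaces the per-index branching loop over range(num_classes) with a direct computation of the two group boundaries and three consecutive range slices (keeping only the irregular num_classes==5 special case).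
import Mathlib
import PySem

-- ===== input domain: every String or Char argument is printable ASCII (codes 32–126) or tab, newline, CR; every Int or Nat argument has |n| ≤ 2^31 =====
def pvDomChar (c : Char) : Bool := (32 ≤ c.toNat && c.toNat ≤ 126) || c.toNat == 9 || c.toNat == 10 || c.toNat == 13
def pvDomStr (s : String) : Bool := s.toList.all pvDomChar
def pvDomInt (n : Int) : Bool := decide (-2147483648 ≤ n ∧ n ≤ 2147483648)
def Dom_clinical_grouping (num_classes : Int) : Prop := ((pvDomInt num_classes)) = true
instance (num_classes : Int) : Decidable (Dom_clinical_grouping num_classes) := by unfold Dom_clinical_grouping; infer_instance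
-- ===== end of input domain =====

-- B replaces A's per-index branching loop with direct boundary computation and three range slices (simpler decomposition).

-- ===== PORT A =====
def clinical_grouping (num_classes : Int) : List (String × List Int) :=
  if num_classes = 5 then [("CN", [0, 1]), ("MCI", [2]), ("AD", [3, 4])]
  else if num_classes = 3 then [("CN", [0]), ("MCI", [1]), ("AD", [2])]
  else
    let groups : PySem.Dict String (List Int) :=
      PySem.Dict.ofList [("CN", []), ("MCI", []), ("AD", [])]
    let groups := (PySem.List.pyRange 0 num_classes 1).foldl (fun g index =>
      if index ≤ max 0 (PySem.Int.floordiv num_classes 3 - 1) then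
        g.modify "CN" [] (fun v => v ++ [index])
      else if max 0 (PySem.Int.floordiv (2 * num_classes) 3) ≤ index then
        g.modify "AD" [] (fun v => v ++ [index])
      else
        g.modify "MCI" [] (fun v => v ++ [index])) groups
    groups.items

-- ===== PORT B =====
def clinical_grouping_alt (num_classes : Int) : List (String × List Int) :=
  if num_classes = 5 then [("CN", [0, 1]), ("MCI", [2]), ("AD", [3, 4])]
  else
    let cnEnd := max 0 (PySem.Int.floordiv num_classes 3 - 1)
    let adStart := max 0 (PySem.Int.floordiv (2 * num_classes) 3)
    let cut1 := min (cnEnd + 1) num_classes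
    let cut2 := min (max cut1 adStart) num_classes
    [("CN", PySem.List.pyRange 0 cut1 1),
     ("MCI", PySem.List.pyRange cut1 cut2 1),
     ("AD", PySem.List.pyRange cut2 num_classes 1)]

-- ===== PRECONDITION & SPEC =====
def Spec_clinical_grouping (num_classes : Int) (out : List (String × List Int)) : Prop := out = clinical_grouping_alt num_classes
instance (num_classes : Int) (out : List (String × List Int)) : Decidable (Spec_clinical_grouping num_classes out) := by unfold Spec_clinical_grouping; infer_instance

-- ===== CLAIM (what is proved, stated in full; the proofs are below) =====
def Claim_equal_clinical_grouping : Prop := ∀ (num_classes : Int), Dom_clinical_grouping num_classes → Spec_clinical_grouping num_classes (clinical_grouping num_classes)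

-- ===== LEMMAS AND PROOFS =====

-- which bucket A's loop sends index i to (c = CN upper bound, a = AD lower bound)
def pvLabel (c a i : Int) : String := if i ≤ c then "CN" else if a ≤ i then "AD" else "MCI"

lemma pvLabel_CN (c a i : Int) (h : i ≤ c) : pvLabel c a i = "CN" := by
  unfold pvLabel; rw [if_pos h]

lemma pvLabel_AD (c a i : Int) (h1 : ¬ i ≤ c) (h2 : a ≤ i) : pvLabel c a i = "AD" := by
  unfold pvLabel; rw [if_neg h1, if_pos h2]

lemma pvLabel_MCI (c a i : Int) (h1 : ¬ i ≤ c) (h2 : ¬ a ≤ i) : pvLabel c a i = "MCI" := by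
  unfold pvLabel; rw [if_neg h1, if_neg h2]

lemma pvSplit (n c a : Int) (hc : 0 ≤ c) (_ha : 0 ≤ a) (hn : 0 < n) :
    PySem.List.pyRange 0 n 1
      = PySem.List.pyRange 0 (min (c + 1) n) 1
        ++ PySem.List.pyRange (min (c + 1) n) (min (max (min (c + 1) n) a) n) 1
        ++ PySem.List.pyRange (min (max (min (c + 1) n) a) n) n 1 := by
  rw [List.append_assoc,
      ← PySem.List.pyRange_one_append (min (c + 1) n) (min (max (min (c + 1) n) a) n) n
        (by omega) (by omega),
      ← PySem.List.pyRange_one_append 0 (min (c + 1) n) n (by omega) (by omega)]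

lemma pvFilter_CN (n c a : Int) (hc : 0 ≤ c) (ha : 0 ≤ a) :
    (PySem.List.pyRange 0 n 1).filter (fun i => pvLabel c a i == "CN")
      = PySem.List.pyRange 0 (min (c + 1) n) 1 := by
  rcases (by omega : n ≤ 0 ∨ 0 < n) with hn | hn
  · rw [PySem.List.pyRange_one_eq_nil hn, PySem.List.pyRange_one_eq_nil (by omega)]; rfl
  · rw [pvSplit n c a hc ha hn, List.filter_append, List.filter_append]
    rw [List.filter_eq_self.mpr (fun x hx => by
          rw [PySem.List.mem_pyRange_one] at hx
          rw [pvLabel_CN c a x (by omega)]; rfl),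
        List.filter_eq_nil_iff.mpr (fun x hx => by
          rw [PySem.List.mem_pyRange_one] at hx
          rcases (by omega : a ≤ x ∨ x < a) with h2 | h2
          · rw [pvLabel_AD c a x (by omega) h2]; decide
          · rw [pvLabel_MCI c a x (by omega) (by omega)]; decide),
        List.filter_eq_nil_iff.mpr (fun x hx => by
          rw [PySem.List.mem_pyRange_one] at hx
          rw [pvLabel_AD c a x (by omega) (by omega)]; decide)]
    simp

lemma pvFilter_MCI (n c a : Int) (hc : 0 ≤ c) (ha : 0 ≤ a) :
    (PySem.List.pyRange 0 n 1).filter (fun i => pvLabel c a i == "MCI")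
      = PySem.List.pyRange (min (c + 1) n) (min (max (min (c + 1) n) a) n) 1 := by
  rcases (by omega : n ≤ 0 ∨ 0 < n) with hn | hn
  · rw [PySem.List.pyRange_one_eq_nil hn, PySem.List.pyRange_one_eq_nil (by omega)]; rfl
  · rw [pvSplit n c a hc ha hn, List.filter_append, List.filter_append]
    rw [List.filter_eq_nil_iff.mpr (fun x hx => by
          rw [PySem.List.mem_pyRange_one] at hx
          rw [pvLabel_CN c a x (by omega)]; decide),
        List.filter_eq_self.mpr (fun x hx => by
          rw [PySem.List.mem_pyRange_one] at hx
          rw [pvLabel_MCI c a x (by omega) (by omega)]; rfl),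
        List.filter_eq_nil_iff.mpr (fun x hx => by
          rw [PySem.List.mem_pyRange_one] at hx
          rw [pvLabel_AD c a x (by omega) (by omega)]; decide)]
    simp

lemma pvFilter_AD (n c a : Int) (hc : 0 ≤ c) (ha : 0 ≤ a) :
    (PySem.List.pyRange 0 n 1).filter (fun i => pvLabel c a i == "AD")
      = PySem.List.pyRange (min (max (min (c + 1) n) a) n) n 1 := by
  rcases (by omega : n ≤ 0 ∨ 0 < n) with hn | hn
  · rw [PySem.List.pyRange_one_eq_nil hn, PySem.List.pyRange_one_eq_nil (by omega)]; rfl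
  · rw [pvSplit n c a hc ha hn, List.filter_append, List.filter_append]
    rw [List.filter_eq_nil_iff.mpr (fun x hx => by
          rw [PySem.List.mem_pyRange_one] at hx
          rw [pvLabel_CN c a x (by omega)]; decide),
        List.filter_eq_nil_iff.mpr (fun x hx => by
          rw [PySem.List.mem_pyRange_one] at hx
          rw [pvLabel_MCI c a x (by omega) (by omega)]; decide),
        List.filter_eq_self.mpr (fun x hx => by
          rw [PySem.List.mem_pyRange_one] at hx
          rw [pvLabel_AD c a x (by omega) (by omega)]; rfl)]
    simp

lemma pvFold_items (n c a : Int) (hc : 0 ≤ c) (ha : 0 ≤ a) :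
    ((PySem.List.pyRange 0 n 1).foldl (fun g i =>
        if i ≤ c then g.modify "CN" [] (fun v => v ++ [i])
        else if a ≤ i then g.modify "AD" [] (fun v => v ++ [i])
        else g.modify "MCI" [] (fun v => v ++ [i]))
      (PySem.Dict.ofList [("CN", ([] : List Int)), ("MCI", []), ("AD", [])])).items
    = [("CN", PySem.List.pyRange 0 (min (c + 1) n) 1),
       ("MCI", PySem.List.pyRange (min (c + 1) n) (min (max (min (c + 1) n) a) n) 1),
       ("AD", PySem.List.pyRange (min (max (min (c + 1) n) a) n) n 1)] := by
  have hstep : (fun (g : PySem.Dict String (List Int)) (i : Int) =>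
        if i ≤ c then g.modify "CN" [] (fun v => v ++ [i])
        else if a ≤ i then g.modify "AD" [] (fun v => v ++ [i])
        else g.modify "MCI" [] (fun v => v ++ [i]))
      = fun g i => g.modify (pvLabel c a i) [] (fun v => v ++ [i]) := by
    funext g i; unfold pvLabel; split_ifs <;> rfl
  rw [hstep]
  rw [show ((PySem.List.pyRange 0 n 1).foldl
        (fun (g : PySem.Dict String (List Int)) i => g.modify (pvLabel c a i) [] (fun v => v ++ [i]))
        (PySem.Dict.ofList [("CN", ([] : List Int)), ("MCI", []), ("AD", [])]))
      = (((PySem.List.pyRange 0 n 1).map (fun i => (pvLabel c a i, i))).foldl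
          (fun (d : PySem.Dict String (List Int)) p => d.modify p.1 [] (fun v => v ++ [p.2]))
          (PySem.Dict.ofList [("CN", ([] : List Int)), ("MCI", []), ("AD", [])]))
      by rw [List.foldl_map]]
  have hnodup : (((PySem.List.pyRange 0 n 1).map (fun i => (pvLabel c a i, i))).foldl
      (fun (d : PySem.Dict String (List Int)) p => d.modify p.1 [] (fun v => v ++ [p.2]))
      (PySem.Dict.ofList [("CN", ([] : List Int)), ("MCI", []), ("AD", [])])).keys.Nodup := by
    exact PySem.Dict.nodup_keys_foldl_modify_key _ _ _ _ _ (by decide)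
  have hkeys : (((PySem.List.pyRange 0 n 1).map (fun i => (pvLabel c a i, i))).foldl
      (fun (d : PySem.Dict String (List Int)) p => d.modify p.1 [] (fun v => v ++ [p.2]))
      (PySem.Dict.ofList [("CN", ([] : List Int)), ("MCI", []), ("AD", [])])).keys
      = ["CN", "MCI", "AD"] := by
    rw [PySem.Dict.keys_foldl_modify_key]
    rw [show (PySem.Dict.ofList [("CN", ([] : List Int)), ("MCI", []), ("AD", [])]).keys
        = ["CN", "MCI", "AD"] from rfl]
    rw [List.map_map, PySem.Set.update_eq_append_filter]
    rw [List.filter_eq_nil_iff.mpr (fun y hy => by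
      rw [PySem.Set.mem_ofList, List.mem_map] at hy
      obtain ⟨i, _, hi⟩ := hy
      subst hi
      simp only [Function.comp_apply, Bool.not_eq_true', Bool.not_eq_false]
      unfold pvLabel; split_ifs <;> decide)]
    simp
  rw [PySem.Dict.items_eq_map_keys _ hnodup ([] : List Int), hkeys]
  simp only [List.map_cons, List.map_nil]
  rw [PySem.Dict.getD_foldl_modify_append, PySem.Dict.getD_foldl_modify_append,
      PySem.Dict.getD_foldl_modify_append]
  rw [List.filter_map, List.filter_map, List.filter_map, List.map_map, List.map_map, List.map_map]
  simp only [Function.comp_def]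
  simp only [List.map_id']
  rw [pvFilter_CN n c a hc ha, pvFilter_MCI n c a hc ha, pvFilter_AD n c a hc ha]
  rfl

-- ===== VERDICT (by name: the statement is the Claim_ definition above) =====
theorem clinical_grouping_spec : Claim_equal_clinical_grouping := by
  intro n _
  unfold Spec_clinical_grouping clinical_grouping clinical_grouping_alt
  by_cases h5 : n = 5
  · simp [h5]
  by_cases h3 : n = 3
  · subst h3; simp only [h5]; decide
  simp only [h5, h3, if_false]
  exact pvFold_items n _ _ (le_max_left _ _) (le_max_left _ _)
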